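-- pv_equiv track=rewrite | github.com/EduBrainBoost/SSID | 12_tooling/scripts/sot_rule_forensics/advanced_patterns.py | _find_shell_comments
-- ===== SOURCE A (Python) =====
-- from typing import Dict, List, Optional, Tuple, Set
--
-- def _find_shell_comments(lines: List[str]) -> List[Tuple[int, str]]:
--     """Find shell comments with rule descriptions"""
--     comments = []
--     in_shell = False
--     for i, line in enumerate(lines, 1):
--         if line.strip().startswith('```bash') or line.strip().startswith('```sh'):
--             in_shell = True
--         elif line.strip() == '```':
--             in_shell = False
--         elif in_shell and line.strip().startswith('#'):
--             comment = line.strip()[1:].strip()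
--             if any(kw in comment for kw in ['Validation', 'Rule', 'Check', 'Enforcement']):
--                 comments.append((i, comment))
--     return comments
-- ===== SOURCE B (Python) =====
-- from typing import List, Tuple
--
-- _KEYWORDS = ('Validation', 'Rule', 'Check', 'Enforcement')
--
--
-- def _shell_blocks(lines: List[str]) -> List[List[Tuple[int, str]]]:
--     """Split the input into shell code blocks: each block is the list of
--     (1-based line number, line) pairs strictly between its fences.
--     A still-open block at end of input extends to the end."""
--     blocks = []
--     current = None
--     for i, line in enumerate(lines, 1):
--         s = line.strip()
--         if s.startswith('```bash') or s.startswith('```sh'):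
--             if current is None:
--                 current = []
--         elif s == '```':
--             if current is not None:
--                 blocks.append(current)
--                 current = None
--         elif current is not None:
--             current.append((i, line))
--     if current is not None:
--         blocks.append(current)
--     return blocks
--
--
-- def _comment_of(line: str):
--     s = line.strip()
--     if s.startswith('#'):
--         c = s[1:].strip()
--         if any(kw in c for kw in _KEYWORDS):
--             return c
--     return None
--
--
-- def _find_shell_comments(lines: List[str]) -> List[Tuple[int, str]]:
--     return [(i, c)
--             for block in _shell_blocks(lines)
--             for i, line in block
--             for c in (_comment_of(line),)
--             if c is not None]
-- ===== Notes on version B (the rewrite author's own statement) =====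
-- stated objective: alternative
-- what changed: A's single pass with an in_shell flag is replaced by a two-phase decomposition: first split the input into shell blocks of (lineno, line) pairs (an unclosed block runs to end of input), then filter each block's lines through a comment-extraction helper via a comprehension.
import Mathlib
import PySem

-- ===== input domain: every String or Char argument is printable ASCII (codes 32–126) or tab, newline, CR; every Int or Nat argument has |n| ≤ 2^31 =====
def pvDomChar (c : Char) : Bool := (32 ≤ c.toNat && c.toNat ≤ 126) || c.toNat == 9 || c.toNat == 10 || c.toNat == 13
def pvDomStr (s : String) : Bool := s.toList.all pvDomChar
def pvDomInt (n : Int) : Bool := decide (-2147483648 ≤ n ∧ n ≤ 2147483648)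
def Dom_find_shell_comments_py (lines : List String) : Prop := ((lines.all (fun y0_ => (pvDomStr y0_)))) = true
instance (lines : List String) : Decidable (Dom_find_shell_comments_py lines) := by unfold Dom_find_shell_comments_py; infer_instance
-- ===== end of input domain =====

-- B does the same job in two phases (split into shell blocks, then filter each block);
-- objective: alternative decomposition, same cost.

-- ===== PORT A =====
-- A: one pass over the enumerated lines with an in_shell flag, appending matches.
def pvGoA : List String → Int → Bool → List (Int × String)
  | [], _, _ => []
  | l :: rest, i, ins =>
    if PySem.Str.startswith (PySem.Str.strip l) "```bash"
        || PySem.Str.startswith (PySem.Str.strip l) "```sh" then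
      pvGoA rest (i + 1) true
    else if PySem.Str.strip l == "```" then
      pvGoA rest (i + 1) false
    else if ins && PySem.Str.startswith (PySem.Str.strip l) "#" then
      let comment := PySem.Str.strip (PySem.Str.slice (PySem.Str.strip l) (some 1) none)
      if ["Validation", "Rule", "Check", "Enforcement"].any
          (fun kw => PySem.Str.isIn kw comment) then
        (i, comment) :: pvGoA rest (i + 1) ins
      else
        pvGoA rest (i + 1) ins
    else
      pvGoA rest (i + 1) ins

def find_shell_comments_py (lines : List String) : List (Int × String) :=
  pvGoA lines 1 false

-- ===== PORT B =====
-- B phase 1: split into shell blocks of (lineno, line) pairs (an open block runs to the end).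
def pvShellBlocks : List String → Int → Option (List (Int × String)) → List (List (Int × String))
  | [], _, cur =>
    match cur with
    | none => []
    | some c => [c]
  | l :: rest, i, cur =>
    if PySem.Str.startswith (PySem.Str.strip l) "```bash"
        || PySem.Str.startswith (PySem.Str.strip l) "```sh" then
      pvShellBlocks rest (i + 1) (match cur with | none => some [] | some c => some c)
    else if PySem.Str.strip l == "```" then
      match cur with
      | none => pvShellBlocks rest (i + 1) none
      | some c => c :: pvShellBlocks rest (i + 1) none
    else
      match cur with
      | none => pvShellBlocks rest (i + 1) none
      | some c => pvShellBlocks rest (i + 1) (some (c ++ [(i, l)]))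

-- B phase 2: a block line is a keyword comment or not.
def pvCommentOf (l : String) : Option String :=
  let s := PySem.Str.strip l
  if PySem.Str.startswith s "#" then
    let c := PySem.Str.strip (PySem.Str.slice s (some 1) none)
    if ["Validation", "Rule", "Check", "Enforcement"].any (fun kw => PySem.Str.isIn kw c) then
      some c
    else none
  else none

def find_shell_comments_py_alt (lines : List String) : List (Int × String) :=
  (pvShellBlocks lines 1 none).flatMap
    (fun block => block.filterMap (fun p => (pvCommentOf p.2).map (fun c => (p.1, c))))

-- ===== PRECONDITION & SPEC =====
def Spec_find_shell_comments_py (lines : List String) (out : List (Int × String)) : Prop := out = find_shell_comments_py_alt lines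
instance (lines : List String) (out : List (Int × String)) : Decidable (Spec_find_shell_comments_py lines out) := by unfold Spec_find_shell_comments_py; infer_instance

-- ===== CLAIM (what is proved, stated in full; the proofs are below) =====
def Claim_equal_find_shell_comments_py : Prop := ∀ (lines : List String), Dom_find_shell_comments_py lines → Spec_find_shell_comments_py lines (find_shell_comments_py lines)

-- ===== LEMMAS AND PROOFS =====

def pvEmit (block : List (Int × String)) : List (Int × String) :=
  block.filterMap (fun p => (pvCommentOf p.2).map (fun c => (p.1, c)))

-- Invariant: emitting the blocks of the rest of the input, with an already-collected
-- current block `cur`, yields cur's comments followed by what A's loop still produces.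
theorem pvBlocks_goA (lines : List String) : ∀ (i : Int) (cur : Option (List (Int × String))),
    ((pvShellBlocks lines i cur).flatMap pvEmit)
      = (match cur with | none => [] | some c => pvEmit c) ++ pvGoA lines i cur.isSome := by
  induction lines with
  | nil =>
    intro i cur
    cases cur <;> simp [pvShellBlocks, pvGoA, pvEmit]
  | cons l rest ih =>
    intro i cur
    cases cur with
    | none =>
      simp only [pvShellBlocks, pvGoA, Option.isSome_none, Bool.false_and]
      by_cases hopen : (PySem.Str.startswith (PySem.Str.strip l) "```bash"
          || PySem.Str.startswith (PySem.Str.strip l) "```sh") = true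
      · rw [if_pos hopen, if_pos hopen]
        simpa using ih (i + 1) (some [])
      · rw [if_neg hopen, if_neg hopen]
        by_cases hclose : (PySem.Str.strip l == "```") = true
        · rw [if_pos hclose, if_pos hclose]
          simpa using ih (i + 1) none
        · rw [if_neg hclose, if_neg hclose, if_neg (by simp)]
          simpa using ih (i + 1) none
    | some c =>
      simp only [pvShellBlocks, pvGoA, Option.isSome_some, Bool.true_and]
      by_cases hopen : (PySem.Str.startswith (PySem.Str.strip l) "```bash"
          || PySem.Str.startswith (PySem.Str.strip l) "```sh") = true
      · rw [if_pos hopen, if_pos hopen]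
        simpa using ih (i + 1) (some c)
      · rw [if_neg hopen, if_neg hopen]
        by_cases hclose : (PySem.Str.strip l == "```") = true
        · rw [if_pos hclose, if_pos hclose]
          rw [List.flatMap_cons]
          simpa using ih (i + 1) none
        · rw [if_neg hclose, if_neg hclose]
          have hrec := ih (i + 1) (some (c ++ [(i, l)]))
          rw [hrec]
          simp only [pvEmit, List.filterMap_append, List.filterMap_cons,
            List.filterMap_nil, List.append_assoc]
          by_cases hcom : (PySem.Str.startswith (PySem.Str.strip l) "#") = true
          · simp only [pvCommentOf]
            rw [if_pos hcom, if_pos hcom]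
            by_cases hkw : (["Validation", "Rule", "Check", "Enforcement"].any
                (fun kw => PySem.Str.isIn kw
                  (PySem.Str.strip (PySem.Str.slice (PySem.Str.strip l) (some 1) none)))) = true
            · rw [if_pos hkw, if_pos hkw]
              simp
            · rw [if_neg hkw, if_neg hkw]
              simp
          · simp only [pvCommentOf]
            rw [if_neg hcom, if_neg hcom]
            simp

-- ===== VERDICT (by name: the statement is the Claim_ definition above) =====
theorem find_shell_comments_py_spec : Claim_equal_find_shell_comments_py := by
  intro lines _
  unfold Spec_find_shell_comments_py find_shell_comments_py find_shell_comments_py_alt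
  have h := pvBlocks_goA lines 1 none
  simpa [pvEmit] using h.symm
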